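-- pv_equiv track=rewrite | github.com/RuanVitorr/atividades-de-Computabilidade-e-Complexidade-de-Algortimos | att15.py | afn_comprimento_par
-- ===== SOURCE A (Python) =====
-- def afn_comprimento_par(palavra):
--     estado = 'q0'
--
--     for char in palavra:
--         if estado == 'q0':
--             if char == 'a':
--                 estado = 'q1'
--             elif char == 'b':
--                 estado = 'q1'
--             else:
--                 return 'palavra invalida (caractere inválido)'
--         elif estado == 'q1':
--             if char == 'a':
--                 estado = 'q0'
--             elif char == 'b':
--                 estado = 'q0'
--             else:
--                 return 'palavra invalida (caractere inválido)'
--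
--     if estado == 'q0':
--         return "palavra valida (comprimento par)"
--     else:
--         return "palavra invalida (comprimento ímpar)"
-- ===== SOURCE B (Python) =====
-- def afn_comprimento_par(palavra):
--     if not all(c in 'ab' for c in palavra):
--         return 'palavra invalida (caractere inválido)'
--     if len(palavra) % 2 == 0:
--         return "palavra valida (comprimento par)"
--     return "palavra invalida (comprimento ímpar)"
-- ===== Notes on version B (the rewrite author's own statement) =====
-- stated objective: simpler
-- what changed: Replaces the two-state DFA toggle loop by a separate all-characters-valid membership check plus a closed-form parity test on the length.
import Mathlib
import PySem

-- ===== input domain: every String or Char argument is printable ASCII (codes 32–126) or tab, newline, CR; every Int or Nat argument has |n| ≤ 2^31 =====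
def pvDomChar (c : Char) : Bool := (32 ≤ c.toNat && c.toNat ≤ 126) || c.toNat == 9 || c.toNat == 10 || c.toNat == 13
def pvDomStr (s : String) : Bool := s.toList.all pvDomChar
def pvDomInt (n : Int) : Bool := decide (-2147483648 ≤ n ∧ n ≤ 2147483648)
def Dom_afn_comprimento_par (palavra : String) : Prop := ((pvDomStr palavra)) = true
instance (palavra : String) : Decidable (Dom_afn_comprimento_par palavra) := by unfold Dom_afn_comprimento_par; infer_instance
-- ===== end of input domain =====

-- B replaces A's two-state DFA toggle by an all-chars-in-{'a','b'} check plus a length-parity test (objective: simpler).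

-- ===== PORT A =====
-- literal transliteration of A's for-loop with early return; estado is the Python state string
def afnLoopA (estado : String) (cs : List Char) : String :=
  match cs with
  | [] =>
    if estado == "q0" then "palavra valida (comprimento par)"
    else "palavra invalida (comprimento ímpar)"
  | c :: rest =>
    if estado == "q0" then
      if c == 'a' then afnLoopA "q1" rest
      else if c == 'b' then afnLoopA "q1" rest
      else "palavra invalida (caractere inválido)"
    else if estado == "q1" then
      if c == 'a' then afnLoopA "q0" rest
      else if c == 'b' then afnLoopA "q0" rest
      else "palavra invalida (caractere inválido)"
    else afnLoopA estado rest

def afn_comprimento_par (palavra : String) : String :=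
  afnLoopA "q0" palavra.toList

-- ===== PORT B =====
def afn_comprimento_par_alt (palavra : String) : String :=
  if ¬ (palavra.toList.all (fun c => c == 'a' || c == 'b')) then
    "palavra invalida (caractere inválido)"
  else if palavra.toList.length % 2 == 0 then
    "palavra valida (comprimento par)"
  else
    "palavra invalida (comprimento ímpar)"

-- ===== PRECONDITION & SPEC =====
def Spec_afn_comprimento_par (palavra : String) (out : String) : Prop := out = afn_comprimento_par_alt palavra
instance (palavra : String) (out : String) : Decidable (Spec_afn_comprimento_par palavra out) := by unfold Spec_afn_comprimento_par; infer_instance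

-- ===== CLAIM (what is proved, stated in full; the proofs are below) =====
def Claim_equal_afn_comprimento_par : Prop := ∀ (palavra : String), Dom_afn_comprimento_par palavra → Spec_afn_comprimento_par palavra (afn_comprimento_par palavra)

-- ===== LEMMAS AND PROOFS =====
-- DFA invariant: from q0 the loop accepts iff the remaining length is even, from q1 iff odd
theorem afnLoopA_char (cs : List Char) :
    (afnLoopA "q0" cs =
      (if cs.all (fun c => c == 'a' || c == 'b') then
        (if cs.length % 2 == 0 then "palavra valida (comprimento par)"
         else "palavra invalida (comprimento ímpar)")
       else "palavra invalida (caractere inválido)")) ∧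
    (afnLoopA "q1" cs =
      (if cs.all (fun c => c == 'a' || c == 'b') then
        (if cs.length % 2 == 1 then "palavra valida (comprimento par)"
         else "palavra invalida (comprimento ímpar)")
       else "palavra invalida (caractere inválido)")) := by
  induction cs with
  | nil => simp [afnLoopA]
  | cons c rest ih =>
    obtain ⟨ih0, ih1⟩ := ih
    by_cases ha : c = 'a'
    · subst ha
      constructor
      · simp [afnLoopA, ih1, Nat.add_mod]
        rcases Nat.mod_two_eq_zero_or_one rest.length with hp | hp <;> simp [hp]
      · simp [afnLoopA, ih0, Nat.add_mod]
        rcases Nat.mod_two_eq_zero_or_one rest.length with hp | hp <;> simp [hp]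
    · by_cases hb : c = 'b'
      · subst hb
        constructor
        · simp [afnLoopA, ih1, Nat.add_mod]
          rcases Nat.mod_two_eq_zero_or_one rest.length with hp | hp <;> simp [hp]
        · simp [afnLoopA, ih0, Nat.add_mod]
          rcases Nat.mod_two_eq_zero_or_one rest.length with hp | hp <;> simp [hp]
      · constructor <;> simp [afnLoopA, ha, hb]

-- ===== VERDICT (by name: the statement is the Claim_ definition above) =====
theorem afn_comprimento_par_spec : Claim_equal_afn_comprimento_par := by
  intro palavra _
  unfold Spec_afn_comprimento_par afn_comprimento_par afn_comprimento_par_alt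
  rw [(afnLoopA_char palavra.toList).1]
  by_cases h : palavra.toList.all (fun c => c == 'a' || c == 'b') = true <;> simp [h]
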